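-- pv_equiv track=rewrite | github.com/haochencheng/Agents-Memory | agents_memory/mcp_app.py | _filter_rules_by_domain
-- ===== SOURCE A (Python) =====
-- def _filter_rules_by_domain(content: str, headers: list[str]) -> str:
--     # Extract lines belonging to the first matching domain section.
--     result_lines: list[str] = []
--     in_section = False
--     for line in content.splitlines():
--         if any(line.startswith(h) for h in headers):
--             in_section = True
--         elif line.startswith("## ") and in_section:
--             break
--         if in_section:
--             result_lines.append(line)
--     return "\n".join(result_lines)
-- ===== SOURCE B (Python) =====
-- def _filter_rules_by_domain(content: str, headers: list[str]) -> str: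
--     # Index-based: locate the section start once, then its end boundary; slice.
--     lines = content.splitlines()
--     matches = lambda l: any(l.startswith(h) for h in headers)
--     start = next((i for i, l in enumerate(lines) if matches(l)), None)
--     if start is None:
--         return ""
--     end = next((j for j in range(start + 1, len(lines))
--                 if lines[j].startswith("## ") and not matches(lines[j])),
--                len(lines))
--     return "\n".join(lines[start:end])
-- ===== Notes on version B (the rewrite author's own statement) =====
-- stated objective: alternative
-- what changed: Replaced A's stateful line-by-line accumulator with in_section flag and break by an index-based version: find the start index of the first header match, find the end boundary index, and slice-join lines[start:end].
import Mathlib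
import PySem

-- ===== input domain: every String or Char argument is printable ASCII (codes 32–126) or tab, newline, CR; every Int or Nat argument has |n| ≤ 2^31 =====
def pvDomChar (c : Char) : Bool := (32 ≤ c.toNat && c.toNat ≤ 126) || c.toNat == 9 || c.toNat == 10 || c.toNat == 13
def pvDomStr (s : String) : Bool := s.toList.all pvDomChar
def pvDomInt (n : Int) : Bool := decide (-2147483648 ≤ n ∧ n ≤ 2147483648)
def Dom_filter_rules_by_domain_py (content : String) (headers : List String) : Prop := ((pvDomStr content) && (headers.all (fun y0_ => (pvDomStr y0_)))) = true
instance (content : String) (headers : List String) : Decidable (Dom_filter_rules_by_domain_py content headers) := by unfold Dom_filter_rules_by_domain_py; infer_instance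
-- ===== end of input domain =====

-- B replaces A's stateful accumulate-with-break loop by an index-based decomposition (find start, find end boundary, slice-join); alternative structure, same cost.


-- ===== PORT A =====
def pvMatchesHeader (headers : List String) (l : String) : Bool :=
  headers.any (fun h => PySem.Str.startswith l h)

-- A's for-loop with break, as structural recursion over the remaining lines
-- carrying (result_lines, in_section); the 'break' returns the accumulator.
def pvFilterA_go (headers : List String) (lines : List String)
    (acc : List String) (inSec : Bool) : List String :=
  match lines with
  | [] => acc
  | l :: rest =>
    if pvMatchesHeader headers l then
      pvFilterA_go headers rest (acc ++ [l]) true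
    else if PySem.Str.startswith l "## " && inSec then
      acc
    else if inSec then
      pvFilterA_go headers rest (acc ++ [l]) inSec
    else
      pvFilterA_go headers rest acc inSec

def filter_rules_by_domain_py (content : String) (headers : List String) : String :=
  PySem.Str.join "\n" (pvFilterA_go headers (PySem.Str.splitlines content) [] false)


-- ===== PORT B =====
def filter_rules_by_domain_py_alt (content : String) (headers : List String) : String :=
  let lines := PySem.Str.splitlines content
  match lines.findIdx? (fun l => pvMatchesHeader headers l) with
  | none => ""
  | some start =>
    let rest := lines.drop (start + 1)
    let stop :=
      match rest.findIdx? (fun l =>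
          PySem.Str.startswith l "## " && !pvMatchesHeader headers l) with
      | some k => k
      | none => rest.length
    PySem.Str.join "\n" ((lines.drop start).take (stop + 1))


-- ===== PRECONDITION & SPEC =====
def Spec_filter_rules_by_domain_py (content : String) (headers : List String) (out : String) : Prop := out = filter_rules_by_domain_py_alt content headers
instance (content : String) (headers : List String) (out : String) : Decidable (Spec_filter_rules_by_domain_py content headers out) := by unfold Spec_filter_rules_by_domain_py; infer_instance

-- ===== CLAIM (what is proved, stated in full; the proofs are below) =====
def Claim_equal_filter_rules_by_domain_py : Prop := ∀ (content : String) (headers : List String), Dom_filter_rules_by_domain_py content headers → Spec_filter_rules_by_domain_py content headers (filter_rules_by_domain_py content headers)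

-- ===== LEMMAS AND PROOFS =====

-- ===== VERDICT (by name: the statement is the Claim_ definition above) =====

-- section-body predicate: a line continues the section unless it is a '## '
-- line matching no header
def pvKeep (headers : List String) (l : String) : Bool :=
  !(PySem.Str.startswith l "## " && !pvMatchesHeader headers l)

theorem pvFilterA_go_true (headers : List String) (lines : List String) (acc : List String) :
    pvFilterA_go headers lines acc true = acc ++ lines.takeWhile (pvKeep headers) := by
  induction lines generalizing acc with
  | nil => simp [pvFilterA_go]
  | cons l rest ih =>
    by_cases hm : pvMatchesHeader headers l
    · simp [pvFilterA_go, hm, ih, List.takeWhile, pvKeep]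
    · by_cases hs : PySem.Chars.startswith l.toList ['#', '#', ' '] = true
      · simp [pvFilterA_go, hm, hs, List.takeWhile, pvKeep]
      · simp [pvFilterA_go, hm, hs, ih, List.takeWhile, pvKeep]

theorem pvTakeWhile_eq_take_findIdx (p : String → Bool) (xs : List String) :
    xs.takeWhile p =
      xs.take (match xs.findIdx? (fun l => !p l) with
               | some k => k
               | none => xs.length) := by
  induction xs with
  | nil => simp
  | cons x rest ih =>
    by_cases hp : p x
    · simp only [List.takeWhile, List.findIdx?_cons, hp, Bool.not_true, cond_false]
      rw [ih]
      cases h : rest.findIdx? (fun l => !p l) <;> simp [h, List.take_succ_cons]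
    · simp [List.takeWhile, List.findIdx?_cons, hp]

theorem pvFilterA_go_false (headers : List String) (lines : List String) :
    pvFilterA_go headers lines [] false =
      match lines.findIdx? (fun l => pvMatchesHeader headers l) with
      | none => []
      | some start => (lines.drop start).takeWhile (pvKeep headers) := by
  induction lines with
  | nil => simp [pvFilterA_go]
  | cons l rest ih =>
    by_cases hm : pvMatchesHeader headers l
    · simp only [pvFilterA_go, hm, if_true, List.findIdx?_cons, cond_true, List.drop_zero]
      rw [pvFilterA_go_true]
      simp [List.takeWhile, pvKeep, hm]
    · simp only [pvFilterA_go, hm, if_false, Bool.and_false, Bool.false_and]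
      simp only [List.findIdx?_cons, hm, cond_false]
      rw [ih]
      cases h : rest.findIdx? (fun l => pvMatchesHeader headers l) <;> simp [h]

theorem pvSlice (headers : List String) (lines : List String) :
    ∀ start, lines.findIdx? (fun l => pvMatchesHeader headers l) = some start →
      (lines.drop start).takeWhile (pvKeep headers) =
        (lines.drop start).take
          ((match (lines.drop (start + 1)).findIdx? (fun l =>
                PySem.Str.startswith l "## " && !pvMatchesHeader headers l) with
            | some k => k
            | none => (lines.drop (start + 1)).length) + 1) := by
  induction lines with
  | nil => intro start h; simp at h
  | cons l rest ih =>
    intro start h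
    by_cases hm : pvMatchesHeader headers l
    · have h0 : start = 0 := by simp [List.findIdx?_cons, hm] at h; omega
      subst h0
      have hpe : (fun l => PySem.Str.startswith l "## " && !pvMatchesHeader headers l)
          = (fun l => !pvKeep headers l) := by
        funext x; simp [pvKeep]
      simp only [List.drop_zero, List.drop_succ_cons, hpe]
      rw [pvTakeWhile_eq_take_findIdx (pvKeep headers) (l :: rest)]
      have hk : pvKeep headers l = true := by simp [pvKeep, hm]
      simp only [List.findIdx?_cons, hk, Bool.not_true, cond_false]
      cases hr : rest.findIdx? (fun l => !pvKeep headers l) <;> simp [List.take_succ_cons]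
    · simp only [List.findIdx?_cons, hm, cond_false] at h
      cases hr : rest.findIdx? (fun l => pvMatchesHeader headers l) with
      | none => rw [hr] at h; simp at h
      | some s =>
        rw [hr] at h
        simp only [Option.map_some] at h
        obtain rfl : s + 1 = start := Option.some.inj h
        simpa using ih s hr


-- ===== VERDICT =====
theorem filter_rules_by_domain_py_spec : Claim_equal_filter_rules_by_domain_py := by
  intro content headers _
  unfold Spec_filter_rules_by_domain_py filter_rules_by_domain_py filter_rules_by_domain_py_alt
  rw [pvFilterA_go_false]
  cases h : (PySem.Str.splitlines content).findIdx? (fun l => pvMatchesHeader headers l) with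
  | none => simp [h, PySem.Str.join]
  | some start =>
    simp only [h]
    rw [pvSlice headers _ start h]
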